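-- pv_equiv track=rewrite | github.com/jbest2015/clawquake | bot/client.py | _parse_info_string
-- ===== SOURCE A (Python) =====
-- def _parse_info_string(text):
--     """Parse a Q3 info string (\\key\\value\\key2\\value2) into a dict."""
--     text = text.strip('"')
--     parts = text.split('\\')
--     result = {}
--     it = iter(parts[1:] if not parts[0] else parts)
--     for key in it:
--         try:
--             result[key] = next(it)
--         except StopIteration:
--             break
--     return result
-- ===== SOURCE B (Python) =====
-- def _parse_info_string(text):
--     """Parse a Q3 info string (\\key\\value\\key2\\value2) into a dict."""
--     parts = text.strip('"').split('\\')
--     if not parts[0]: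
--         parts = parts[1:]
--     return dict(zip(parts[::2], parts[1::2]))
-- ===== Notes on version B (the rewrite author's own statement) =====
-- stated objective: idiomatic
-- what changed: Replaced the manual iterator loop that pulls key then value via next() (with a StopIteration break) by slicing parts into keys (parts[::2]) and values (parts[1::2]) and building the result with dict(zip(keys, values)).
import Mathlib
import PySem

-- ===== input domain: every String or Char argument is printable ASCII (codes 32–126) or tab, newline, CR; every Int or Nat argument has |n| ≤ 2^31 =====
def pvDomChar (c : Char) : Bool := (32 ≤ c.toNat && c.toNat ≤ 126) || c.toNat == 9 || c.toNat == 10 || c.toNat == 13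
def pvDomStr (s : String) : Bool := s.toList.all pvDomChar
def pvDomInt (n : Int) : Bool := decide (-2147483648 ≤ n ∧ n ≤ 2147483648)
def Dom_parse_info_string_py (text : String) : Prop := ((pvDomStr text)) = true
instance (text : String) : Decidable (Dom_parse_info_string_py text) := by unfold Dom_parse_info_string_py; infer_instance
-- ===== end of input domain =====

-- B replaces A's manual iterator loop by slicing into keys/values and dict(zip(...)); objective: idiomatic, same cost.

-- ===== PORT A =====
-- A's for-loop over the iterator: pull a key, then its value (StopIteration on a trailing odd key breaks).
def pvLoopA : List String → PySem.Dict String String → PySem.Dict String String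
  | [], d => d
  | [_], d => d
  | k :: v :: rest, d => pvLoopA rest (d.insert k v)

def parse_info_string_py (text : String) : List (String × String) :=
  let text := PySem.Str.stripChars text "\""
  let parts := (PySem.Str.split? text "\\").getD []   -- sep is the non-empty "\\": split? never returns none here
  let it := if (PySem.List.pyGet? parts 0).getD "" = "" then PySem.List.slice parts (some 1) none else parts
  (pvLoopA it PySem.Dict.empty).items

-- ===== PORT B =====
def parse_info_string_py_alt (text : String) : List (String × String) :=
  let parts0 := (PySem.Str.split? (PySem.Str.stripChars text "\"") "\\").getD []   -- sep non-empty, never none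
  let parts := if (PySem.List.pyGet? parts0 0).getD "" = "" then PySem.List.slice parts0 (some 1) none else parts0
  let keys := (PySem.List.slice? parts none none 2).getD []       -- parts[::2]; step 2 ≠ 0, never none
  let vals := (PySem.List.slice? parts (some 1) none 2).getD []   -- parts[1::2]
  (PySem.Dict.ofList (keys.zip vals)).items

-- ===== PRECONDITION & SPEC =====
def Spec_parse_info_string_py (text : String) (out : List (String × String)) : Prop := out = parse_info_string_py_alt text
instance (text : String) (out : List (String × String)) : Decidable (Spec_parse_info_string_py text out) := by unfold Spec_parse_info_string_py; infer_instance

-- ===== CLAIM (what is proved, stated in full; the proofs are below) =====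
def Claim_equal_parse_info_string_py : Prop := ∀ (text : String), Dom_parse_info_string_py text → Spec_parse_info_string_py text (parse_info_string_py text)

-- ===== LEMMAS AND PROOFS =====
-- elements at even positions (0,2,4,…)
def pvEvens {α : Type} : List α → List α
  | [] => []
  | [a] => [a]
  | a :: _ :: rest => a :: pvEvens rest

lemma pvFM_evens {α : Type} (xs : List α) :
    (List.range ((xs.length + 1) / 2)).filterMap (fun k => xs[2 * k]?) = pvEvens xs := by
  induction xs using pvEvens.induct with
  | case1 => simp [pvEvens]
  | case2 a => simp [pvEvens, List.range_succ]
  | case3 a b rest ih =>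
    have hc : (((a :: b :: rest).length + 1) / 2) = (rest.length + 1) / 2 + 1 := by
      simp; omega
    rw [hc, List.range_succ_eq_map, List.filterMap_cons, List.filterMap_map]
    simp only [Function.comp_def]
    simp only [show ∀ k, (a :: b :: rest)[2 * (k+1)]? = rest[2 * k]? from fun k => by
      have h2 : 2 * (k+1) = (2 * k) + 1 + 1 := by omega
      rw [h2]; simp]
    simp [pvEvens, ih]

lemma pvSlice2_none {α : Type} (xs : List α) :
    PySem.List.slice? xs none none 2 = some (pvEvens xs) := by
  simp only [PySem.List.slice?, PySem.List.sliceIndices]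
  norm_num
  have hcount : (if 0 < xs.length then (((xs.length : Int) + 2 - 1) / 2).toNat else 0)
      = (xs.length + 1) / 2 := by
    split <;> omega
  rw [hcount]
  have hidx : (fun (k : Nat) => xs[((2 : Int) * ↑k).toNat]?) = (fun k => xs[2 * k]?) := by
    funext k; congr 1
  rw [hidx, pvFM_evens]

lemma pvSlice2_one {α : Type} (xs : List α) :
    PySem.List.slice? xs (some 1) none 2 = some (pvEvens xs.tail) := by
  cases xs with
  | nil => rfl
  | cons y ys =>
    simp only [PySem.List.slice?, PySem.List.sliceIndices]
    norm_num
    have hcount : (if 0 < ys.length then (((ys.length : Int) + 2 - 1) / 2).toNat else 0)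
        = (ys.length + 1) / 2 := by
      split <;> omega
    rw [hcount]
    have hidx : (fun (k : Nat) => (y :: ys)[((1 : Int) + 2 * ↑k).toNat]?) = (fun k => ys[2 * k]?) := by
      funext k
      have h2 : ((1 : Int) + 2 * ↑k).toNat = (2 * k) + 1 := by omega
      rw [h2]; simp
    rw [hidx, pvFM_evens]

lemma pvEvens_cons {α : Type} (k : α) (v : List α) :
    pvEvens (k :: v) = k :: pvEvens v.tail := by cases v <;> rfl

lemma pvLoopA_eq (xs : List String) (d : PySem.Dict String String) :
    pvLoopA xs d = PySem.Dict.update d ((pvEvens xs).zip (pvEvens xs.tail)) := by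
  induction xs, d using pvLoopA.induct with
  | case1 d => rfl
  | case2 d _ => rfl
  | case3 d k v rest ih => simp [pvLoopA, pvEvens, pvEvens_cons, PySem.Dict.update, List.zip, ih]

-- ===== VERDICT (by name: the statement is the Claim_ definition above) =====
theorem parse_info_string_py_spec : Claim_equal_parse_info_string_py := by
  intro text _
  unfold Spec_parse_info_string_py parse_info_string_py parse_info_string_py_alt
  simp only [pvSlice2_none, pvSlice2_one, Option.getD_some, pvLoopA_eq]
  rfl
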